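-- pv_equiv track=rewrite | github.com/pypi-data/pypi-mirror-145 | packages/mutwo.ext-music/mutwo.ext_music-0.11.1-py3-none-any.whl/mutwo/music_parameters/pitches.py | _discard_nulls
-- ===== SOURCE A (Python) =====
-- import typing
--
-- def _discard_nulls(iterable: typing.Iterable[int]) -> tuple[int, ...]:
--     r"""Discard all zeros after the last not 0 - element of an arbitary iterable.
--
--     Return a tuple.
--     Arguments:
--         * iterable: the iterable, whose 0 - elements shall
--           be discarded
--
--     >>> tuple0 = (1, 0, 2, 3, 0, 0, 0)
--     >>> ls = [1, 3, 5, 0, 0, 0, 2, 0]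
--     >>> JustIntonationPitch._discard_nulls(tuple0)
--     (1, 0, 2, 3)
--     >>> JustIntonationPitch._discard_nulls(ls)
--     (1, 3, 5, 0, 0, 0, 2)
--     """
--
--     iterable = tuple(iterable)
--     c = 0
--     for i in reversed(iterable):
--         if i != 0:
--             break
--         c += 1
--     if c != 0:
--         return iterable[:-c]
--     return iterable
-- ===== SOURCE B (Python) =====
-- import typing
--
-- def _discard_nulls(iterable: typing.Iterable[int]) -> tuple[int, ...]:
--     """Forward single pass: remember the index of the last non-zero element, slice up to it."""
--     t = tuple(iterable)
--     last = -1
--     for i, value in enumerate(t):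
--         if value != 0:
--             last = i
--     return t[:last + 1]
-- ===== Notes on version B (the rewrite author's own statement) =====
-- stated objective: alternative
-- what changed: Replaces the reverse scan with break plus trailing-zero count and negative slice by a forward scan over enumerate maintaining the last non-zero index, slicing to last+1.
import Mathlib
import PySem

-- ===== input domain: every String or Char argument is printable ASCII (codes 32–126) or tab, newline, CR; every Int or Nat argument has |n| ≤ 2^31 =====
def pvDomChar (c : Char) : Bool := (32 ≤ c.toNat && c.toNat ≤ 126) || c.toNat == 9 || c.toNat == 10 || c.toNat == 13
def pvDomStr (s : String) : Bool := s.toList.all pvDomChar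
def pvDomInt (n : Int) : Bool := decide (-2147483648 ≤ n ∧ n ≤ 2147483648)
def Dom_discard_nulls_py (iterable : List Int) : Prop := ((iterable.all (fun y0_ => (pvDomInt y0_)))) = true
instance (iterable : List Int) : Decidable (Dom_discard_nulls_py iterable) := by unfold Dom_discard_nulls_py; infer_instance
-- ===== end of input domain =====

-- B replaces A's reverse scan (break + trailing-zero count + negative slice) with a
-- forward scan over enumerate keeping the last non-zero index; same return value (alternative decomposition).

-- ===== PORT A =====
-- the 'for i in reversed(iterable): if i != 0: break; c += 1' loop, as structural recursion on the reversed list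
def pvTrailCount : List Int → Int
  | [] => 0
  | x :: xs => if x ≠ 0 then 0 else pvTrailCount xs + 1

def discard_nulls_py (iterable : List Int) : List Int :=
  let c := pvTrailCount iterable.reverse
  if c ≠ 0 then PySem.List.slice iterable none (some (-c)) else iterable

-- ===== PORT B =====
-- 'last = -1; for i, value in enumerate(t): if value != 0: last = i'
def pvLastNonzero (t : List Int) : Int :=
  (PySem.List.enumerate t 0).foldl (fun last p => if p.2 ≠ 0 then p.1 else last) (-1)

def discard_nulls_py_alt (iterable : List Int) : List Int :=
  PySem.List.slice iterable none (some (pvLastNonzero iterable + 1))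

-- ===== PRECONDITION & SPEC =====
def Spec_discard_nulls_py (iterable : List Int) (out : List Int) : Prop := out = discard_nulls_py_alt iterable
instance (iterable : List Int) (out : List Int) : Decidable (Spec_discard_nulls_py iterable out) := by unfold Spec_discard_nulls_py; infer_instance

-- ===== CLAIM (what is proved, stated in full; the proofs are below) =====
def Claim_equal_discard_nulls_py : Prop := ∀ (iterable : List Int), Dom_discard_nulls_py iterable → Spec_discard_nulls_py iterable (discard_nulls_py iterable)

-- ===== LEMMAS AND PROOFS =====

-- Nat-valued trailing-zero count, mirror of pvTrailCount
def pvNatTrail : List Int → Nat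
  | [] => 0
  | x :: xs => if x ≠ 0 then 0 else pvNatTrail xs + 1

theorem pvTrailCount_eq_nat (xs : List Int) : pvTrailCount xs = (pvNatTrail xs : Int) := by
  induction xs with
  | nil => rfl
  | cons x xs ih =>
    simp only [pvTrailCount, pvNatTrail]
    split_ifs <;> simp [ih]

theorem pvNatTrail_le (xs : List Int) : pvNatTrail xs ≤ xs.length := by
  induction xs with
  | nil => simp [pvNatTrail]
  | cons x xs ih =>
    simp only [pvNatTrail, List.length_cons]
    split_ifs <;> omega

-- A's result as a take
theorem discard_eq_take (l : List Int) :
    discard_nulls_py l = l.take (l.length - pvNatTrail l.reverse) := by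
  unfold discard_nulls_py
  rw [pvTrailCount_eq_nat]
  by_cases h : pvNatTrail l.reverse = 0
  · simp [h]
  · have hk : 0 < pvNatTrail l.reverse := Nat.pos_of_ne_zero h
    rw [if_pos (by exact_mod_cast h)]
    exact PySem.List.slice_to_neg_natCast l _ hk

-- B's key invariant: last non-zero index + 1 = length − trailing-zero count
theorem pvLastNonzero_add_one (t : List Int) :
    pvLastNonzero t + 1 = ((t.length - pvNatTrail t.reverse : Nat) : Int) := by
  induction t using List.reverseRecOn with
  | nil => rfl
  | append_singleton l x ih =>
    have hfold : pvLastNonzero (l ++ [x])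
        = (if x ≠ 0 then ((l.length : Int)) else pvLastNonzero l) := by
      unfold pvLastNonzero
      rw [PySem.List.enumerate_append, List.foldl_append]
      simp
    by_cases hx : x = 0
    · have hle := pvNatTrail_le l.reverse
      have hlen : l.reverse.length = l.length := List.length_reverse
      rw [hfold, if_neg (by simp [hx])]
      rw [ih]
      simp only [hx, pvNatTrail, List.reverse_append, List.reverse_cons,
        List.reverse_nil, List.nil_append, List.singleton_append, ne_eq,
        not_true_eq_false, if_false, List.length_append, List.length_singleton]
      omega
    · rw [hfold, if_pos hx]
      simp [pvNatTrail, hx]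

-- B's result as a take
theorem alt_eq_take (l : List Int) :
    discard_nulls_py_alt l = l.take (l.length - pvNatTrail l.reverse) := by
  unfold discard_nulls_py_alt
  rw [pvLastNonzero_add_one]
  exact PySem.List.slice_to_natCast l _

-- ===== VERDICT (by name: the statement is the Claim_ definition above) =====
theorem discard_nulls_py_spec : Claim_equal_discard_nulls_py := by
  intro l _
  unfold Spec_discard_nulls_py
  rw [discard_eq_take, alt_eq_take]
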